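-- pv_equiv track=rewrite | github.com/ellynhan/challenge100-codingtest-study | dajeong-kim/hash/[PGS]신고결과받기.py | solution
-- ===== SOURCE A (Python) =====
-- def solution(id_list, report, k):
--     user_reported = {} #신고당한 유저
--     count = {} # 처리 결과 메일을 받은 유저
--
--     # 신고당한 유저 key : 신고한 유저 리스트 value
--     for r in report:
--         fr, to = r.split()
--         if to not in user_reported:
--             user_reported[to] = set()
--         user_reported[to].add(fr)
--
--     # user_reported에 저장된 정보를 기준으로 신고당한 횟수가 k번 이상이면 count 추가
--     # count : 메일을 보낼 횟수
--     for reported, report_user_list in user_reported.items():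
--         if len(report_user_list)>=k:
--             for user in report_user_list:
--                 if user not in count:
--                     count[user] = 1
--                 else:
--                     count[user] += 1
--
--     answer = []
--     for i in range(len(id_list)):
--         if id_list[i] not in count:
--             answer.append(0)
--         else:
--             answer.append(count[id_list[i]])
--
--     return answer
-- ===== SOURCE B (Python) =====
-- def solution(id_list, report, k):
--     # Deduplicate reports into a set of (reporter, reported) pairs,
--     # count reports per reported user, take the banned set, then count mails per reporter.
--     pairs = set()
--     for r in report:
--         fr, to = r.split()
--         pairs.add((fr, to))
--     counts = {}
--     for _, to in pairs:
--         counts[to] = counts.get(to, 0) + 1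
--     banned = {to for to, c in counts.items() if c >= k}
--     mailed = [fr for fr, to in pairs if to in banned]
--     mail = {}
--     for fr in mailed:
--         mail[fr] = mail.get(fr, 0) + 1
--     return [mail.get(u, 0) for u in id_list]
-- ===== Notes on version B (the rewrite author's own statement) =====
-- stated objective: idiomatic
-- what changed: Replaces A's dict-of-reporter-sets with a deduplicated set of (reporter, reported) pairs plus a flat count dict and an explicit banned set; the mail counts come from one pass over the unique pairs instead of a nested loop over the per-user sets.
import Mathlib
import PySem

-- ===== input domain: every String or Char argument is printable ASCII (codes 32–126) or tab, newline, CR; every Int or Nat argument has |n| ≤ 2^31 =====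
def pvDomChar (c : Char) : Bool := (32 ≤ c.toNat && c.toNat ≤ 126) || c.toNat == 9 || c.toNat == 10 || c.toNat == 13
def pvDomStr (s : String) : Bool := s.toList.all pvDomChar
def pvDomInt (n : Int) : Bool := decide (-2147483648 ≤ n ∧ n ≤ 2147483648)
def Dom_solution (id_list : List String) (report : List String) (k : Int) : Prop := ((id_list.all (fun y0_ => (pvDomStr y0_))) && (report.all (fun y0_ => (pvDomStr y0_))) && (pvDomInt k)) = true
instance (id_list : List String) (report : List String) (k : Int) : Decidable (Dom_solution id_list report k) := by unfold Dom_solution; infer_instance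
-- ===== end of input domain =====

-- B replaces A's dict of per-reported-user reporter sets with a deduplicated set of
-- (reporter, reported) pairs, a flat count dict and an explicit banned set (idiomatic; not claimed faster).

-- ===== PORT A =====
-- for r in report: fr, tgt = r.split(); user_reported.setdefault(tgt, set()).add-style accumulation
def pvStepA (d : PySem.Dict String (PySem.Set String)) (r : String) :
    PySem.Dict String (PySem.Set String) :=
  match PySem.Str.split₀ r with
  | [fr, tgt] =>
      let d := if d.contains tgt then d else d.insert tgt PySem.Set.empty
      d.modify tgt PySem.Set.empty (fun s => s.add fr)
  | _ => d   -- unreachable under Pre_: Python raises ValueError on unpacking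

-- inner loop of A's second phase: count[user] = 1 if absent else count[user] += 1
def pvCountStep (c : PySem.Dict String Int) (user : String) : PySem.Dict String Int :=
  if c.contains user then c.modify user 0 (· + 1) else c.insert user 1

def solution (id_list : List String) (report : List String) (k : Int) : List Int :=
  let user_reported : PySem.Dict String (PySem.Set String) :=
    report.foldl pvStepA PySem.Dict.empty
  let count : PySem.Dict String Int :=
    user_reported.items.foldl (fun c p =>
      if k ≤ PySem.List.len p.2 then p.2.foldl pvCountStep c else c) PySem.Dict.empty
  (PySem.List.pyRange 0 (PySem.List.len id_list)).foldl (fun answer i =>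
    if count.contains (PySem.List.pyGetD id_list i "") = false then answer ++ [(0 : Int)]
    else answer ++ [count.getD (PySem.List.pyGetD id_list i "") 0]) []

-- ===== PORT B =====
-- pairs.add((fr, tgt)) for each report line
def pvStepB (ps : PySem.Set (String × String)) (r : String) : PySem.Set (String × String) :=
  match PySem.Str.split₀ r with
  | [fr, tgt] => ps.add (fr, tgt)
  | _ => ps   -- unreachable under Pre_

def solution_alt (id_list : List String) (report : List String) (k : Int) : List Int :=
  let pairs : PySem.Set (String × String) := report.foldl pvStepB PySem.Set.empty
  let counts : PySem.Dict String Int :=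
    pairs.foldl (fun c p => c.insert p.2 (c.getD p.2 0 + 1)) PySem.Dict.empty
  let banned : PySem.Set String :=
    PySem.Set.ofList ((counts.items.filter (fun q => k ≤ q.2)).map Prod.fst)
  let mailed : List String := (pairs.filter (fun p => banned.contains p.2)).map Prod.fst
  let mail : PySem.Dict String Int :=
    mailed.foldl (fun m fr => m.insert fr (m.getD fr 0 + 1)) PySem.Dict.empty
  id_list.map (fun u => mail.getD u 0)

-- ===== PRECONDITION & SPEC =====
-- Pre_ excludes report entries that do not split into exactly two whitespace-separated
-- tokens: there Python's 'fr, tgt = r.split()' raises ValueError in both A and B.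
def Pre_solution (id_list : List String) (report : List String) (k : Int) : Prop :=
  ∀ r ∈ report, (PySem.Str.split₀ r).length = 2
instance (id_list : List String) (report : List String) (k : Int) : Decidable (Pre_solution id_list report k) := by unfold Pre_solution; infer_instance

def pvWitness_solution : List String × List String × Int :=
  (["muzi", "frodo", "apeach"], ["muzi frodo", "apeach frodo", "muzi frodo"], 2)

def Spec_solution (id_list : List String) (report : List String) (k : Int) (out : List Int) : Prop := out = solution_alt id_list report k
instance (id_list : List String) (report : List String) (k : Int) (out : List Int) : Decidable (Spec_solution id_list report k out) := by unfold Spec_solution; infer_instance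

-- ===== CLAIM (what is proved, stated in full; the proofs are below) =====
def Claim_equal_solution : Prop := ∀ (id_list : List String) (report : List String) (k : Int), Dom_solution id_list report k → Pre_solution id_list report k → Spec_solution id_list report k (solution id_list report k)

-- ===== LEMMAS AND PROOFS =====

-- the items list A's first loop maintains, expressed from B's pair set
def pvMkUR (ps : List (String × String)) : List (String × List String) :=
  (PySem.Set.ofList (ps.map Prod.snd)).map
    (fun tgt => (tgt, (ps.filter (fun p => p.2 == tgt)).map Prod.fst))

theorem pv_mem_rep (ps : List (String × String)) (fr tgt : String) :
    fr ∈ (ps.filter (fun p => p.2 == tgt)).map Prod.fst ↔ (fr, tgt) ∈ ps := by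
  simp only [List.mem_map, List.mem_filter, beq_iff_eq]
  constructor
  · rintro ⟨⟨a, b⟩, ⟨hm, hb⟩, ha⟩; simp_all
  · intro h; exact ⟨(fr, tgt), ⟨h, rfl⟩, rfl⟩

theorem pv_find_map (l : List String) (g : String → List String) (tgt : String) (h : tgt ∈ l) :
    (l.map (fun t => (t, g t))).find? (fun p => p.1 == tgt) = some (tgt, g tgt) := by
  induction l with
  | nil => simp at h
  | cons t ts ih =>
    by_cases ht : t = tgt
    · subst ht; simp
    · rcases List.mem_cons.mp h with h' | h'
      · exact absurd h'.symm ht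
      · simpa [List.find?_cons, ht] using ih h'

theorem pv_contains_mkUR (ps : List (String × String)) (tgt : String) :
    PySem.Dict.contains (⟨pvMkUR ps⟩ : PySem.Dict String (PySem.Set String)) tgt
      = decide (tgt ∈ ps.map Prod.snd) := by
  simp [PySem.Dict.contains, pvMkUR, List.any_map]
  by_cases h : tgt ∈ ps.map Prod.snd
  · simp [h, PySem.Set.mem_ofList]
    obtain ⟨⟨a, b⟩, hm, hb⟩ := List.mem_map.mp h
    exact ⟨a, by cases hb; exact hm⟩
  · simp [h, PySem.Set.mem_ofList]
    rintro b a hab rfl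
    exact h (List.mem_map.mpr ⟨(a, b), hab, rfl⟩)

theorem pv_getD_mkUR (ps : List (String × String)) (tgt : String)
    (h : tgt ∈ ps.map Prod.snd) :
    PySem.Dict.getD (⟨pvMkUR ps⟩ : PySem.Dict String (PySem.Set String)) tgt PySem.Set.empty
      = (ps.filter (fun p => p.2 == tgt)).map Prod.fst := by
  have h' : tgt ∈ PySem.Set.ofList (ps.map Prod.snd) := (PySem.Set.mem_ofList _ _).mpr h
  simp [PySem.Dict.getD, PySem.Dict.get?, pvMkUR, pv_find_map _ _ _ h']

theorem pv_set_add_of_mem {α : Type} [BEq α] [LawfulBEq α] (s : PySem.Set α) (x : α)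
    (h : x ∈ s) : s.add x = s := by
  simp [PySem.Set.add, h]

theorem pv_set_add_of_not_mem {α : Type} [BEq α] [LawfulBEq α] (s : PySem.Set α) (x : α)
    (h : x ∉ s) : s.add x = s ++ [x] := by
  simp [PySem.Set.add, h]

theorem pv_keys_mkUR (ps : List (String × String)) {p : String × List String}
    (hp : p ∈ pvMkUR ps) : p.1 ∈ ps.map Prod.snd := by
  obtain ⟨t, ht, rfl⟩ := List.mem_map.mp hp
  exact (PySem.Set.mem_ofList _ _).mp ht

theorem pv_insert_mkUR (ps : List (String × String)) (tgt : String) (v : PySem.Set String)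
    (hmem : tgt ∈ ps.map Prod.snd) :
    PySem.Dict.insert (⟨pvMkUR ps⟩ : PySem.Dict String (PySem.Set String)) tgt v
      = ⟨(PySem.Set.ofList (ps.map Prod.snd)).map
          (fun t => if t = tgt then (tgt, v)
                    else (t, (ps.filter (fun p => p.2 == t)).map Prod.fst))⟩ := by
  have hc : PySem.Dict.contains (⟨pvMkUR ps⟩ : PySem.Dict String (PySem.Set String)) tgt = true := by
    rw [pv_contains_mkUR]; simp [hmem]
  simp only [PySem.Dict.insert, hc, if_true]
  congr 1
  simp only [pvMkUR, List.map_map]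
  apply List.map_congr_left
  intro t _
  by_cases ht : t = tgt <;> simp [ht]

theorem pv_stepA_mkUR (ps : List (String × String)) (fr tgt r : String)
    (hr : PySem.Str.split₀ r = [fr, tgt]) :
    pvStepA ⟨pvMkUR ps⟩ r = ⟨pvMkUR (PySem.Set.add ps (fr, tgt))⟩ := by
  by_cases hmem : tgt ∈ ps.map Prod.snd
  · have hc : PySem.Dict.contains (⟨pvMkUR ps⟩ : PySem.Dict String (PySem.Set String)) tgt = true := by
      rw [pv_contains_mkUR]; simp [hmem]
    simp only [pvStepA, hr, hc, if_true, PySem.Dict.modify, pv_getD_mkUR ps tgt hmem]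
    by_cases hp : (fr, tgt) ∈ ps
    · rw [pv_set_add_of_mem ps _ hp, pv_set_add_of_mem _ fr ((pv_mem_rep ps fr tgt).mpr hp),
        pv_insert_mkUR ps tgt _ hmem]
      congr 1
      apply List.map_congr_left
      intro t _
      by_cases ht : t = tgt <;> simp [ht, pvMkUR]
    · have hfr : fr ∉ (ps.filter (fun p => p.2 == tgt)).map Prod.fst :=
        fun hm => hp ((pv_mem_rep ps fr tgt).mp hm)
      rw [pv_set_add_of_not_mem ps _ hp, pv_set_add_of_not_mem _ fr hfr,
        pv_insert_mkUR ps tgt _ hmem]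
      have hofl : PySem.Set.ofList ((ps ++ [(fr, tgt)]).map Prod.snd)
          = PySem.Set.ofList (ps.map Prod.snd) := by
        simp only [List.map_append, PySem.Set.ofList, List.foldl_append]
        exact pv_set_add_of_mem _ _ ((PySem.Set.mem_ofList _ _).mpr hmem)
      congr 1
      simp only [pvMkUR, hofl]
      apply List.map_congr_left
      intro t _
      by_cases ht : t = tgt
      · simp [ht, List.filter_append, List.map_append]
      · simp [ht, List.filter_append, List.map_append, Ne.symm ht]
  · have hc : PySem.Dict.contains (⟨pvMkUR ps⟩ : PySem.Dict String (PySem.Set String)) tgt = false := by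
      rw [pv_contains_mkUR]; simp [hmem]
    have hp : (fr, tgt) ∉ ps := fun hm => hmem (List.mem_map.mpr ⟨(fr, tgt), hm, rfl⟩)
    have hins : PySem.Dict.insert (⟨pvMkUR ps⟩ : PySem.Dict String (PySem.Set String)) tgt PySem.Set.empty
        = ⟨pvMkUR ps ++ [(tgt, PySem.Set.empty)]⟩ := by
      simp [PySem.Dict.insert, hc]
    have htos : tgt ∉ PySem.Set.ofList (ps.map Prod.snd) :=
      fun h => hmem ((PySem.Set.mem_ofList _ _).mp h)
    have hfind : (pvMkUR ps).find? (fun p => p.1 == tgt) = none :=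
      List.find?_eq_none.mpr (fun x hx hbeq =>
        hmem (beq_iff_eq.mp hbeq ▸ pv_keys_mkUR ps hx))
    have hgetD : PySem.Dict.getD
        (⟨pvMkUR ps ++ [(tgt, PySem.Set.empty)]⟩ : PySem.Dict String (PySem.Set String))
        tgt PySem.Set.empty = PySem.Set.empty := by
      simp [PySem.Dict.getD, PySem.Dict.get?, List.find?_append, hfind]
    have hc2 : PySem.Dict.contains
        (⟨pvMkUR ps ++ [(tgt, PySem.Set.empty)]⟩ : PySem.Dict String (PySem.Set String)) tgt = true := by
      simp [PySem.Dict.contains]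
    simp only [pvStepA, hr, hc, if_false, Bool.false_eq_true, hins, PySem.Dict.modify, hgetD]
    have hadd : (PySem.Set.empty : PySem.Set String).add fr = [fr] := rfl
    rw [hadd, pv_set_add_of_not_mem ps _ hp]
    simp only [PySem.Dict.insert, hc2, if_true]
    congr 1
    have hrepnil : ps.filter (fun p => p.2 == tgt) = [] :=
      List.filter_eq_nil_iff.mpr (fun p hp' hbeq =>
        hmem (beq_iff_eq.mp hbeq ▸ List.mem_map.mpr ⟨p, hp', rfl⟩))
    have hofl2 : PySem.Set.ofList (ps.map Prod.snd ++ [tgt])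
        = PySem.Set.ofList (ps.map Prod.snd) ++ [tgt] := by
      simp only [PySem.Set.ofList, List.foldl_append, List.foldl_cons, List.foldl_nil]
      exact pv_set_add_of_not_mem _ _ htos
    simp only [pvMkUR, List.map_append, List.map_cons, List.map_nil, hofl2, List.map_map]
    congr 1
    · apply List.map_congr_left
      intro t htmem
      have ht : ¬t = tgt := fun h => htos (h ▸ htmem)
      simp [ht, List.filter_append, Ne.symm ht]
    · simp [List.filter_append, hrepnil]

theorem pv_phase1 (report : List String) (h : ∀ r ∈ report, (PySem.Str.split₀ r).length = 2)
    (ps : List (String × String)) :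
    (report.foldl pvStepA ⟨pvMkUR ps⟩).items = pvMkUR (report.foldl pvStepB ps) := by
  induction report generalizing ps with
  | nil => simp
  | cons r rs ih =>
    obtain ⟨fr, tgt, hsp⟩ := List.length_eq_two.mp (h r (by simp))
    rw [List.foldl_cons, List.foldl_cons, pv_stepA_mkUR ps fr tgt r hsp,
      show pvStepB ps r = PySem.Set.add ps (fr, tgt) by simp [pvStepB, hsp]]
    exact ih (fun r' hr' => h r' (by simp [hr'])) _

theorem pv_countP_or_disjoint {α : Type} (l : List α) (p q : α → Bool)
    (h : ∀ x ∈ l, ¬(p x = true ∧ q x = true)) :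
    l.countP (fun x => p x || q x) = l.countP p + l.countP q := by
  induction l with
  | nil => simp
  | cons x xs ih =>
    have hx := h x (by simp)
    have ihx := ih (fun y hy => h y (by simp [hy]))
    by_cases hp : p x = true
    · have hq : q x = false := by
        rcases Bool.eq_false_or_eq_true (q x) with h' | h'
        · exact absurd ⟨hp, h'⟩ hx
        · exact h'
      simp [List.countP_cons, hp, hq, ihx]; omega
    · by_cases hq : q x = true <;> simp [List.countP_cons, hp, hq, ihx] <;> omega

theorem pv_inner_count (lst : List String) (c : PySem.Dict String Int) (u : String) :
    (lst.foldl pvCountStep c).getD u 0 = c.getD u 0 + (lst.count u : Int) := by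
  induction lst generalizing c with
  | nil => simp
  | cons x xs ih =>
    have hx : pvCountStep c x = c.insert x (c.getD x 0 + 1) := by
      rw [pvCountStep]; by_cases hc : c.contains x
      · simp [hc, PySem.Dict.modify]
      · have hc' : c.contains x = false := by simpa using hc
        rw [if_neg (by simp [hc']), PySem.Dict.getD_of_not_contains c 0 hc']
        norm_num
    rw [List.foldl_cons, hx, ih, PySem.Dict.getD_insert, List.count_cons]
    by_cases hux : u = x
    · simp [hux]; push_cast; ring
    · simp [hux]; exact fun h => hux h.symm

theorem pv_outer_count (k : Int) (L : List (String × List String))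
    (c : PySem.Dict String Int) (u : String) :
    (L.foldl (fun c p => if k ≤ PySem.List.len p.2 then p.2.foldl pvCountStep c else c) c).getD u 0
      = c.getD u 0 + (((L.filter (fun p => k ≤ PySem.List.len p.2)).flatMap Prod.snd).count u : Int) := by
  induction L generalizing c with
  | nil => simp
  | cons p L' ih =>
    rw [List.foldl_cons]
    by_cases hk : k ≤ PySem.List.len p.2
    · rw [if_pos hk, ih, pv_inner_count,
        List.filter_cons_of_pos (by simpa using hk), List.flatMap_cons, List.count_append]
      push_cast; ring
    · rw [if_neg hk, ih, List.filter_cons_of_neg (by simpa using hk)]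

theorem pv_count_map_fst (l : List (String × String)) (q : String × String → Bool) (u : String) :
    (((l.filter q).map Prod.fst).count u : Int)
      = (l.countP (fun p => p.1 == u && q p) : Int) := by
  induction l with
  | nil => simp
  | cons p l' ih =>
    by_cases hq : q p = true
    · rw [List.filter_cons_of_pos hq, List.map_cons, List.count_cons, List.countP_cons]
      by_cases hu : p.1 = u <;> simp [hu, hq, ih] <;> push_cast <;> ring
    · rw [List.filter_cons_of_neg (by simp [hq]), List.countP_cons]
      simp [hq, ih]

theorem pv_flat_count (ps : List (String × String)) (u : String) (L : List String)
    (hL : L.Nodup) :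
    ((L.flatMap (fun t => (ps.filter (fun p => p.2 == t)).map Prod.fst)).count u : Int)
      = (ps.countP (fun p => p.1 == u && decide (p.2 ∈ L)) : Int) := by
  induction L with
  | nil => simp
  | cons t L' ih =>
    have hnd := List.nodup_cons.mp hL
    rw [List.flatMap_cons, List.count_append]
    have hsplit : ps.countP (fun p => p.1 == u && decide (p.2 ∈ t :: L'))
        = ps.countP (fun p => p.1 == u && p.2 == t)
          + ps.countP (fun p => p.1 == u && decide (p.2 ∈ L')) := by
      have := pv_countP_or_disjoint ps
        (fun p => p.1 == u && p.2 == t) (fun p => p.1 == u && decide (p.2 ∈ L'))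
        (fun p _ hpq => by
          obtain ⟨h1, h2⟩ := hpq
          simp only [Bool.and_eq_true, beq_iff_eq, decide_eq_true_eq] at h1 h2
          exact hnd.1 (h1.2 ▸ h2.2))
      rw [← this]
      apply List.countP_congr
      intro p _
      simp only [List.mem_cons]
      by_cases h1 : p.1 = u <;> by_cases h2 : p.2 = t <;> by_cases h3 : p.2 ∈ L' <;>
        simp [h1, h2, h3]
    rw [hsplit]
    push_cast
    rw [pv_count_map_fst, ih hnd.2]

-- ===== VERDICT (by name: the statement is the Claim_ definition above) =====
theorem solution_spec : Claim_equal_solution := by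
  intro id_list report k _ hpre
  unfold Spec_solution solution solution_alt
  simp only []
  have hitems : (report.foldl pvStepA PySem.Dict.empty).items
      = pvMkUR (report.foldl pvStepB PySem.Set.empty) := by
    rw [show (PySem.Dict.empty : PySem.Dict String (PySem.Set String)) = ⟨pvMkUR []⟩ from rfl]
    exact pv_phase1 report hpre []
  rw [hitems]
  set countA := (pvMkUR (report.foldl pvStepB PySem.Set.empty)).foldl
      (fun c p => if k ≤ PySem.List.len p.2 then p.2.foldl pvCountStep c else c)
      PySem.Dict.empty with hcountA
  have hfun : (fun (answer : List Int) i =>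
        if countA.contains (PySem.List.pyGetD id_list i "") = false then answer ++ [(0 : Int)]
        else answer ++ [countA.getD (PySem.List.pyGetD id_list i "") 0])
      = fun answer i => answer ++ [countA.getD (PySem.List.pyGetD id_list i "") 0] := by
    funext a i
    by_cases hc : countA.contains (PySem.List.pyGetD id_list i "") = false
    · rw [if_pos hc, PySem.Dict.getD_of_not_contains _ _ hc]
    · rw [if_neg hc]
  rw [hfun, PySem.List.foldl_append_singleton_eq_map, List.nil_append]
  rw [show (fun i => countA.getD (PySem.List.pyGetD id_list i "") 0)
      = (fun y => countA.getD y 0) ∘ (fun i => PySem.List.pyGetD id_list i "") from rfl,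
    ← List.map_map, PySem.List.map_pyGetD_pyRange_zero]
  apply List.map_congr_left
  intro u _
  rw [hcountA]
  set psR := report.foldl pvStepB PySem.Set.empty with hpsR
  have hemptyD : ∀ v : String, (PySem.Dict.empty : PySem.Dict String Int).getD v 0 = 0 := by
    intro v; simp [PySem.Dict.getD, PySem.Dict.get?, PySem.Dict.empty]
  -- B's count dict is Counter(snd of pairs)
  have hcnt : psR.foldl (fun c p => c.insert p.2 (c.getD p.2 0 + 1)) PySem.Dict.empty
      = PySem.Dict.counter (psR.map Prod.snd) := by
    rw [← PySem.Dict.foldl_insert_getD_add_one_eq_counter, List.foldl_map]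
  -- the banned list, as a filter of the distinct reported users
  have hM : ((psR.foldl (fun c p => c.insert p.2 (c.getD p.2 0 + 1))
        PySem.Dict.empty).items.filter (fun q => k ≤ q.2)).map Prod.fst
      = (PySem.Set.ofList (psR.map Prod.snd)).filter
          (fun t => k ≤ ((psR.map Prod.snd).count t : Int)) := by
    rw [hcnt, PySem.Dict.items_counter, List.filter_map, List.map_map]
    simp [Function.comp_def]
  -- the length of each reporter set equals the Counter value
  have hlen : ∀ t, PySem.List.len ((psR.filter (fun p => p.2 == t)).map Prod.fst)
      = ((psR.map Prod.snd).count t : Int) := by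
    intro t
    rw [List.count_eq_countP, List.countP_map, List.countP_eq_length_filter]
    simp [PySem.List.len, Function.comp_def]
  have hnodup : ((PySem.Set.ofList (psR.map Prod.snd)).filter
      (fun t => k ≤ ((psR.map Prod.snd).count t : Int))).Nodup :=
    (PySem.Set.nodup_ofList _).filter _
  -- A's side: count dict lookup as a countP over the unique pairs
  rw [pv_outer_count, hemptyD]
  rw [show pvMkUR psR = (PySem.Set.ofList (psR.map Prod.snd)).map
      (fun t => (t, (psR.filter (fun p => p.2 == t)).map Prod.fst)) from rfl]
  rw [List.filter_map, List.flatMap_map]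
  simp only [Function.comp_def]
  have hfeq : (PySem.Set.ofList (psR.map Prod.snd)).filter
        (fun t => k ≤ PySem.List.len ((psR.filter (fun p => p.2 == t)).map Prod.fst))
      = (PySem.Set.ofList (psR.map Prod.snd)).filter
        (fun t => k ≤ ((psR.map Prod.snd).count t : Int)) :=
    List.filter_congr (fun t _ => by rw [hlen t])
  rw [hfeq, pv_flat_count _ _ _ hnodup]
  -- B's side
  rw [PySem.Dict.getD_foldl_insert_add_one, hemptyD, pv_count_map_fst, hM,
    PySem.Set.ofList_eq_self_of_nodup _ hnodup]
  push_cast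
  norm_cast
  simp only [Nat.zero_add]
  apply List.countP_congr
  intro p _
  simp [PySem.Set.contains]
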